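-- pv_equiv track=rewrite | github.com/jeffoliveira977/desafio-tecnico | teste2.py | read_ceps_from_file
-- ===== SOURCE A (Python) =====
-- def read_ceps_from_file(lines):
--
--     cities=[]
--     i=0
--
--     # Ler os nomes das cidades e suas faixas de CEP
--     while lines[i] != '--':
--         city_name, start_cep, dest_cep = lines[i].split(',')
--         cities.append((city_name, start_cep, dest_cep))
--         i+=1
--
--     return cities, i
-- ===== SOURCE B (Python) =====
-- def read_ceps_from_file(lines):
--     # locate the sentinel first, then build the result in a separate pass
--     i = lines.index('--')
--     cities = [(a, b, c) for a, b, c in (line.split(',') for line in lines[:i])]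
--     return cities, i
-- ===== Notes on version B (the rewrite author's own statement) =====
-- stated objective: simpler
-- what changed: A's single interleaved index-while loop is replaced by a locate-then-map two-pass structure: first find the sentinel with lines.index('--'), then build the triples with a comprehension over lines[:i].
import Mathlib
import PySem

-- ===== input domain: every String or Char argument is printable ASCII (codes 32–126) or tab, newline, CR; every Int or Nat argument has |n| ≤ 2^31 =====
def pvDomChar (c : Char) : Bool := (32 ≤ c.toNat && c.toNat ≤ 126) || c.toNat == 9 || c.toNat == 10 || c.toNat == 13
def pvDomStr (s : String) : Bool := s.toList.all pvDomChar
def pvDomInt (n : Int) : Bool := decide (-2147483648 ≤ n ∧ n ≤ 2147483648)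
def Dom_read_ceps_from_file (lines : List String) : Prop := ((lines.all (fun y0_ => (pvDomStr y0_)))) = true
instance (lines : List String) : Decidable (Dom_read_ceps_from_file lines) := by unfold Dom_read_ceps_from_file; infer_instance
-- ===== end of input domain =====

-- B replaces A's interleaved while-loop with a locate-the-sentinel scan followed by a
-- separate mapping pass over the prefix (objective: simpler decomposition, same cost).

-- s.split(",") with the nonempty literal separator: split? returns some here
def pySplitComma (s : String) : List String := (PySem.Str.split? s ",").getD []

-- ===== PORT A =====
-- A's while-loop: consume lines one by one, stopping at '--', splitting each into exactly
-- three fields; the counter i is threaded through. The [] and wrong-arity cases are where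
-- Python raises (IndexError / ValueError) — excluded by Pre_ below.
def readCepsGoA : List String → Int → (List (String × String × String)) × Int
  | [], i => ([], i)
  | l :: rest, i =>
    if l = "--" then ([], i)
    else
      match pySplitComma l with
      | [a, b, c] =>
        let r := readCepsGoA rest (i + 1)
        ((a, b, c) :: r.1, r.2)
      | _ => ([], i)

def read_ceps_from_file (lines : List String) : (List (String × String × String)) × Int :=
  readCepsGoA lines 0

-- ===== PORT B =====
-- strict three-way unpacking of a split result (ValueError in Python otherwise — excluded by Pre_)
def readCepsUnpack3 (parts : List String) : String × String × String :=
  match parts with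
  | [a, b, c] => (a, b, c)
  | _ => ("", "", "")

def read_ceps_from_file_alt (lines : List String) : (List (String × String × String)) × Int :=
  match PySem.List.index? lines "--" with
  | some i => ((lines.take i).map (fun l => readCepsUnpack3 (pySplitComma l)), (i : Int))
  | none => ([], 0)   -- lines.index('--') raises ValueError here (outside Pre_)

-- ===== PRECONDITION & SPEC =====
-- Pre_ excludes exactly the inputs where A raises: no '--' sentinel (IndexError) or a line
-- before the sentinel that does not split into exactly three comma-separated fields (ValueError).
def Pre_read_ceps_from_file (lines : List String) : Prop :=
  "--" ∈ lines ∧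
  ∀ l ∈ lines.takeWhile (fun l => l ≠ "--"), (pySplitComma l).length = 3

instance (lines : List String) : Decidable (Pre_read_ceps_from_file lines) := by
  unfold Pre_read_ceps_from_file; infer_instance

def pvWitness_read_ceps_from_file : List String := ["Rio,10000,19999", "Sampa,20000,29999", "--", "x"]

def Spec_read_ceps_from_file (lines : List String) (out : (List (String × String × String)) × Int) : Prop := out = read_ceps_from_file_alt lines
instance (lines : List String) (out : (List (String × String × String)) × Int) : Decidable (Spec_read_ceps_from_file lines out) := by unfold Spec_read_ceps_from_file; infer_instance

-- ===== CLAIM (what is proved, stated in full; the proofs are below) =====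
def Claim_equal_read_ceps_from_file : Prop := ∀ (lines : List String), Dom_read_ceps_from_file lines → Pre_read_ceps_from_file lines → Spec_read_ceps_from_file lines (read_ceps_from_file lines)

-- ===== LEMMAS AND PROOFS =====

lemma readCepsGoA_eq (lines : List String) : ∀ (i : Int) (k : Nat),
    PySem.List.index? lines "--" = some k →
    (∀ l ∈ lines.takeWhile (fun l => l ≠ "--"), (pySplitComma l).length = 3) →
    readCepsGoA lines i =
      ((lines.take k).map (fun l => readCepsUnpack3 (pySplitComma l)), i + k) := by
  induction lines with
  | nil => intro i k h _; simp [PySem.List.index?] at h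
  | cons l rest ih =>
    intro i k hidx hsplit
    by_cases hl : l = "--"
    · subst hl
      rw [PySem.List.index?_cons_self] at hidx
      obtain rfl : k = 0 := by simpa using hidx.symm
      simp [readCepsGoA]
    · rw [PySem.List.index?_cons_of_ne rest hl] at hidx
      obtain ⟨k', hk', rfl⟩ := Option.map_eq_some_iff.mp hidx
      have htw : (l :: rest).takeWhile (fun l => l ≠ "--") = l :: rest.takeWhile (fun l => l ≠ "--") :=
        List.takeWhile_cons_of_pos (by simp [hl])
      have hlen : (pySplitComma l).length = 3 := hsplit l (by rw [htw]; exact List.mem_cons_self)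
      obtain ⟨a, b, c, habc⟩ : ∃ a b c, pySplitComma l = [a, b, c] := by
        match hps : pySplitComma l with
        | [a, b, c] => exact ⟨a, b, c, rfl⟩
        | [] | [_] | [_, _] | _ :: _ :: _ :: _ :: _ => simp [hps] at hlen
      have hrest : ∀ x ∈ rest.takeWhile (fun l => l ≠ "--"), (pySplitComma x).length = 3 := by
        intro x hx
        exact hsplit x (by rw [htw]; exact List.mem_cons_of_mem _ hx)
      have := ih (i + 1) k' hk' hrest
      simp only [readCepsGoA, if_neg hl, habc, this, List.take_succ_cons, List.map_cons,
        readCepsUnpack3]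
      refine Prod.ext rfl ?_
      push_cast; ring

-- ===== VERDICT (by name: the statement is the Claim_ definition above) =====
theorem read_ceps_from_file_spec : Claim_equal_read_ceps_from_file := by
  intro lines _ hpre
  obtain ⟨hmem, hsplit⟩ := hpre
  obtain ⟨k, hk⟩ := Option.isSome_iff_exists.mp ((PySem.List.index?_isSome_iff lines "--").mpr hmem)
  unfold Spec_read_ceps_from_file read_ceps_from_file read_ceps_from_file_alt
  rw [hk, readCepsGoA_eq lines 0 k hk hsplit]
  simp
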